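-- pv_equiv track=rewrite | github.com/hunnam5220/coding_test_study | [나동빈]이것이 코딩 테스트다/09. Solutions/05. Fifth/03. DFS BFS/18._*_괄호 변환.py | solution
-- ===== SOURCE A (Python) =====
-- def get_index(p):
--     cnt = 0
--     for i in range(len(p)):
--         if p[i] == '(':
--             cnt += 1
--         else:
--             cnt -= 1
--
--         if cnt == 0:
--             return i
--
--     return 0
--
-- def check_(p):
--     cnt = 0
--     for i in p:
--         if i == '(':
--             cnt += 1
--         else:
--             if cnt == 0:
--                 return False
--             cnt -= 1
--     return True
--
-- def solution(p):
--     answer = ''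
--     if p == '':
--         return answer
--
--     idx = get_index(p)
--     u, v = p[:idx + 1], p[idx + 1:]
--
--     if check_(u):
--         answer += u + solution(v)
--
--     else:
--
--         answer = '('
--         answer += solution(v)
--         answer += ')'
--
--         u = list(u[1:-1])
--
--         for i in range(len(u)):
--             if u[i] == '(':
--                 u[i] = ')'
--             else:
--                 u[i] = '('
--
--         answer += "".join(u)
--
--     return answer
-- ===== SOURCE B (Python) =====
-- def _proper(u):
--     bal = 0
--     for c in u:
--         bal += 1 if c == '(' else -1
--         if bal < 0:
--             return False
--     return True
--
-- def solution(p):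
--     # split p into A's minimal units in one left-to-right loop
--     units = []
--     s = p
--     while s:
--         cnt = 0
--         cut = 1  # fallback: take just the first char when balance never returns to 0
--         for i, ch in enumerate(s):
--             cnt += 1 if ch == '(' else -1
--             if cnt == 0:
--                 cut = i + 1
--                 break
--         units.append(s[:cut])
--         s = s[cut:]
--     # fold the unit list right-to-left with an accumulator
--     acc = ''
--     for u in reversed(units):
--         if _proper(u):
--             acc = u + acc
--         else:
--             acc = '(' + acc + ')' + ''.join(')' if c == '(' else '(' for c in u[1:-1])
--     return acc
-- ===== Notes on version B (the rewrite author's own statement) =====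
-- stated objective: alternative
-- what changed: Replaces A's recursion with an explicit one-pass loop that splits p into its minimal units (with the same first-char fallback when the balance never returns to zero), then a single right-to-left fold over the unit list building the answer with an accumulator; the proper-prefix check tracks a running balance that may never go negative instead of A's early-return counter.
import Mathlib
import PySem

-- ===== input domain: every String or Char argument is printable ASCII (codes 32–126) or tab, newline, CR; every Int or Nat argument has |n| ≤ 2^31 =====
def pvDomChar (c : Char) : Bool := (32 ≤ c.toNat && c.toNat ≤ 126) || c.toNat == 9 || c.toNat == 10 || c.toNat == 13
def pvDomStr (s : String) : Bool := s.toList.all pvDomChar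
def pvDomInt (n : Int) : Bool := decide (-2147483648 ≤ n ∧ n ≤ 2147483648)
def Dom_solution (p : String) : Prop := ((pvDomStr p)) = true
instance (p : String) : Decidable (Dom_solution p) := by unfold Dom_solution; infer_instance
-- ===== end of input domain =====

-- B replaces A's recursion by a single loop that splits p into A's minimal units, then a
-- right-to-left fold over the unit list (objective: alternative decomposition, same cost).

-- ===== PORT A =====
-- get_index: loop with early return (returns i when cnt hits 0, else 0 at the end)
def getIndexAux : List Char → Int → Nat → Nat
  | [], _, _ => 0
  | c :: rest, cnt, i =>
    if (if c = '(' then cnt + 1 else cnt - 1) = 0 then i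
    else getIndexAux rest (if c = '(' then cnt + 1 else cnt - 1) (i + 1)

-- check_: early return False when a ')' is seen with cnt = 0
def checkA : List Char → Int → Bool
  | [], _ => true
  | c :: rest, cnt =>
    if c = '(' then checkA rest (cnt + 1)
    else if cnt = 0 then false else checkA rest (cnt - 1)

-- the flip loop body of A (and B's comprehension)
def flipc (c : Char) : Char := if c = '(' then ')' else '('

def solutionList (p : List Char) : List Char :=
  if p = [] then []
  else
    if checkA (p.take (getIndexAux p 0 0 + 1)) 0 then
      p.take (getIndexAux p 0 0 + 1) ++ solutionList (p.drop (getIndexAux p 0 0 + 1))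
    else
      '(' :: (solutionList (p.drop (getIndexAux p 0 0 + 1)) ++
        ')' :: (((p.take (getIndexAux p 0 0 + 1)).drop 1).dropLast.map flipc))
termination_by p.length
decreasing_by all_goals
  simp only [List.length_drop]
  have : p.length ≠ 0 := by simpa [← List.length_eq_zero_iff] using ‹¬ p = []›
  omega

def solution (p : String) : String := String.mk (solutionList p.toList)

-- ===== PORT B =====
-- the inner for-loop of B: first cut point (balance returns to 0), fallback 1
def findCut : List Char → Int → Nat → Nat
  | [], _, _ => 1
  | c :: rest, cnt, i =>
    if (if c = '(' then cnt + 1 else cnt - 1) = 0 then i + 1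
    else findCut rest (if c = '(' then cnt + 1 else cnt - 1) (i + 1)

lemma one_le_findCut (s : List Char) (cnt : Int) (i : Nat) : 1 ≤ findCut s cnt i := by
  induction s generalizing cnt i with
  | nil => simp [findCut]
  | cons c rest ih =>
    simp only [findCut]
    split_ifs
    · omega
    · exact ih _ _
    · omega
    · exact ih _ _

-- _proper: bal goes negative → False
def properB : List Char → Int → Bool
  | [], _ => true
  | c :: rest, bal =>
    if (if c = '(' then bal + 1 else bal - 1) < 0 then false
    else properB rest (if c = '(' then bal + 1 else bal - 1)

-- the while loop of B: the ordered list of minimal units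
def splitUnits (s : List Char) : List (List Char) :=
  if s = [] then []
  else s.take (findCut s 0 0) :: splitUnits (s.drop (findCut s 0 0))
termination_by s.length
decreasing_by
  simp only [List.length_drop]
  have h1 : 1 ≤ findCut s 0 0 := one_le_findCut s 0 0
  have : s.length ≠ 0 := by simpa [← List.length_eq_zero_iff] using ‹¬ s = []›
  omega

-- the body of B's fold (the for-loop over reversed(units))
def stepB (u : List Char) (acc : List Char) : List Char :=
  if properB u 0 then u ++ acc
  else '(' :: (acc ++ ')' :: (((u.drop 1).dropLast).map flipc))

def solution_alt (p : String) : String :=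
  String.mk ((splitUnits p.toList).foldr stepB [])

-- ===== PRECONDITION & SPEC =====
def Spec_solution (p : String) (out : String) : Prop := out = solution_alt p
instance (p : String) (out : String) : Decidable (Spec_solution p out) := by unfold Spec_solution; infer_instance

-- ===== CLAIM (what is proved, stated in full; the proofs are below) =====
def Claim_equal_solution : Prop := ∀ (p : String), Dom_solution p → Spec_solution p (solution p)

-- ===== LEMMAS AND PROOFS =====
lemma findCut_eq (s : List Char) (cnt : Int) (i : Nat) :
    findCut s cnt i = getIndexAux s cnt i + 1 := by
  induction s generalizing cnt i with
  | nil => simp [findCut, getIndexAux]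
  | cons c rest ih =>
    simp only [findCut, getIndexAux]
    split_ifs with h1 h2
    · rfl
    · exact ih _ _
    · rfl
    · exact ih _ _

lemma check_eq (u : List Char) (cnt : Int) (h : 0 ≤ cnt) : checkA u cnt = properB u cnt := by
  induction u generalizing cnt with
  | nil => simp [checkA, properB]
  | cons c rest ih =>
    simp only [checkA, properB]
    by_cases hc : c = '('
    · rw [if_pos hc, if_pos hc, if_neg (by omega)]
      exact ih _ (by omega)
    · rw [if_neg hc, if_neg hc]
      by_cases h0 : cnt = 0
      · rw [if_pos h0, if_pos (by omega)]
      · rw [if_neg h0, if_neg (by omega)]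
        exact ih _ (by omega)

lemma main_eq (p : List Char) : solutionList p = (splitUnits p).foldr stepB [] := by
  by_cases h : p = []
  · subst h
    rw [solutionList, splitUnits]
    simp
  · have hcut : findCut p 0 0 = getIndexAux p 0 0 + 1 := findCut_eq p 0 0
    have ih := main_eq (p.drop (getIndexAux p 0 0 + 1))
    rw [solutionList, splitUnits, if_neg h, if_neg h, hcut]
    rw [List.foldr_cons, stepB, ← ih, ← check_eq _ 0 le_rfl]
termination_by p.length
decreasing_by
  simp only [List.length_drop]
  have : p.length ≠ 0 := by simpa [← List.length_eq_zero_iff] using h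
  omega

-- ===== VERDICT (by name: the statement is the Claim_ definition above) =====
theorem solution_spec : Claim_equal_solution := by
  intro p _
  unfold Spec_solution solution solution_alt
  rw [main_eq]
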